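-- pv_equiv track=rewrite | github.com/gnipping/CoPaw | src/copaw/security/tool_guard/hook.py | _parse_guarded_tokens
-- ===== SOURCE A (Python) =====
-- from typing import Any, Iterable
--
-- def _parse_guarded_tokens(tokens: Iterable[str]) -> set[str] | None:
--     """Parse guarded tool tokens into scope set.
--
--     ``None`` means guard all tools.
--     """
--     normalized = {item.strip() for item in tokens if item and item.strip()}
--     if not normalized:
--         return set()
--
--     lowered = {item.lower() for item in normalized}
--     if "*" in lowered or "all" in lowered:
--         return None
--     if lowered.issubset({"none", "off", "false", "0"}):
--         return set()
--
--     return normalized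
-- ===== SOURCE B (Python) =====
-- from typing import Any, Iterable
--
-- # category table: 2 = wildcard (guard everything), 0 = falsey (guard nothing), 1 = ordinary scope
-- _CATEGORY = {"*": 2, "all": 2, "none": 0, "off": 0, "false": 0, "0": 0}
--
-- def _parse_guarded_tokens(tokens):
--     normalized = {item.strip() for item in tokens if item and item.strip()}
--     verdict = max((_CATEGORY.get(s.lower(), 1) for s in normalized), default=None)
--     if verdict is None or verdict == 0:
--         return set()
--     if verdict == 2:
--         return None
--     return normalized
-- ===== Notes on version B (the rewrite author's own statement) =====
-- stated objective: alternative
-- what changed: Replaces A's staged membership tests (wildcard check on a lowered set, then issubset against the falsey literals) with a category lookup table mapping each normalized token to a priority 2/1/0 and a single numeric max-reduction whose maximum decides the verdict (None / set() / the set), so no lowered set and no ordered chain of set tests exists.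
import Mathlib
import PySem

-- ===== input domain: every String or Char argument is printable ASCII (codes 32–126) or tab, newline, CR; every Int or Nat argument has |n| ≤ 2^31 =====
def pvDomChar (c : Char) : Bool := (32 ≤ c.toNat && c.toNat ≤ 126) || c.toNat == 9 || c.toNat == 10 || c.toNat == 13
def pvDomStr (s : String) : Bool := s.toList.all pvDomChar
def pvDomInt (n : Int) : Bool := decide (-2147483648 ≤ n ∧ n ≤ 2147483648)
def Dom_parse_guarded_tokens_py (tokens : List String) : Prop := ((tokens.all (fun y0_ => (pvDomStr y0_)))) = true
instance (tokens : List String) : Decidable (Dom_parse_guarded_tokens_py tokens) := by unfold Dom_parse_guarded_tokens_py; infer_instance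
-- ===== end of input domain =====

-- B replaces A's staged membership tests (wildcard check, issubset against the falsey set)
-- by a category table and one numeric max-reduction over the normalized tokens (alternative decomposition, same cost).

-- ===== PORT A =====
-- step of A's set comprehension: {item.strip() for item in tokens if item and item.strip()}
def pvStepA (acc : PySem.Set String) (item : String) : PySem.Set String :=
  if item ≠ "" ∧ PySem.Str.strip item ≠ "" then PySem.Set.add acc (PySem.Str.strip item) else acc

def parse_guarded_tokens_py (tokens : List String) : Option (List String) :=
  let normalized : PySem.Set String := tokens.foldl pvStepA PySem.Set.empty
  if normalized = [] then some PySem.Set.empty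
  else
    -- {item.lower() for item in normalized}
    let lowered : PySem.Set String := PySem.Set.ofList (normalized.map PySem.Str.lower)
    if PySem.Set.contains lowered "*" || PySem.Set.contains lowered "all" then none
    else if PySem.Set.issubset lowered (PySem.Set.ofList ["none", "off", "false", "0"]) then
      some PySem.Set.empty
    else some normalized

-- ===== PORT B =====
-- _CATEGORY = {"*": 2, "all": 2, "none": 0, "off": 0, "false": 0, "0": 0}
def pvCategory : PySem.Dict String Int :=
  PySem.Dict.ofList [("*", 2), ("all", 2), ("none", 0), ("off", 0), ("false", 0), ("0", 0)]

def parse_guarded_tokens_py_alt (tokens : List String) : Option (List String) :=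
  let normalized : PySem.Set String := tokens.foldl pvStepA PySem.Set.empty
  -- max((_CATEGORY.get(s.lower(), 1) for s in normalized), default=None)
  let verdict : Option Int :=
    PySem.List.max? (normalized.map (fun s => PySem.Dict.getD pvCategory (PySem.Str.lower s) 1)) (fun x => x)
  if verdict = none ∨ verdict = some 0 then some PySem.Set.empty
  else if verdict = some 2 then none
  else some normalized

-- ===== PRECONDITION & SPEC =====
def Spec_parse_guarded_tokens_py (tokens : List String) (out : Option (List String)) : Prop := out = parse_guarded_tokens_py_alt tokens
instance (tokens : List String) (out : Option (List String)) : Decidable (Spec_parse_guarded_tokens_py tokens out) := by unfold Spec_parse_guarded_tokens_py; infer_instance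

-- ===== CLAIM (what is proved, stated in full; the proofs are below) =====
def Claim_equal_parse_guarded_tokens_py : Prop := ∀ (tokens : List String), Dom_parse_guarded_tokens_py tokens → Spec_parse_guarded_tokens_py tokens (parse_guarded_tokens_py tokens)

-- ===== LEMMAS AND PROOFS =====

-- category of a normalized token, as B computes it
def pvCat (s : String) : Int := PySem.Dict.getD pvCategory (PySem.Str.lower s) 1

-- the literal table, read off key by key
lemma pvCategory_getD (x : String) :
    PySem.Dict.getD pvCategory x 1 = if x = "*" ∨ x = "all" then 2
      else if x = "none" ∨ x = "off" ∨ x = "false" ∨ x = "0" then 0 else 1 := by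
  have hpc : pvCategory = PySem.Dict.mk [("*", 2), ("all", 2), ("none", 0), ("off", 0), ("false", 0), ("0", 0)] := by decide
  rw [hpc]
  simp only [PySem.Dict.getD, PySem.Dict.get?_mk_cons]
  by_cases h1 : "*" = x <;> by_cases h2 : "all" = x <;> by_cases h3 : "none" = x <;>
    by_cases h4 : "off" = x <;> by_cases h5 : "false" = x <;> by_cases h6 : "0" = x <;>
    simp_all [PySem.Dict.get?] <;>
    first
      | exact ⟨fun h => h1 h.symm, fun h => h2 h.symm⟩
      | (rw [if_neg (by rintro (rfl | rfl) <;> simp_all),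
             if_neg (by rintro (rfl | rfl | rfl | rfl) <;> simp_all)])

lemma pvCat_range (s : String) : pvCat s = 0 ∨ pvCat s = 1 ∨ pvCat s = 2 := by
  rw [pvCat, pvCategory_getD]; split_ifs <;> simp

lemma pvCat_eq_two_iff (s : String) :
    pvCat s = 2 ↔ (PySem.Str.lower s = "*" ∨ PySem.Str.lower s = "all") := by
  rw [pvCat, pvCategory_getD]; split_ifs <;> simp_all

lemma pvCat_eq_zero_iff (s : String) :
    pvCat s = 0 ↔ (¬(PySem.Str.lower s = "*" ∨ PySem.Str.lower s = "all") ∧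
      (PySem.Str.lower s = "none" ∨ PySem.Str.lower s = "off" ∨
       PySem.Str.lower s = "false" ∨ PySem.Str.lower s = "0")) := by
  rw [pvCat, pvCategory_getD]; split_ifs <;> simp_all

-- A's issubset test over the lowered set, in terms of pvCat (given no wildcard)
lemma sub_iff (N : List String) (hw : ¬ ∃ s ∈ N, pvCat s = 2) :
    PySem.Set.issubset (PySem.Set.ofList (N.map PySem.Str.lower))
      (PySem.Set.ofList ["none", "off", "false", "0"]) = true ↔
    ∀ s ∈ N, pvCat s = 0 := by
  rw [PySem.Set.issubset_iff]
  simp only [PySem.Set.mem_ofList, List.mem_map, List.mem_cons, List.not_mem_nil, or_false,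
    forall_exists_index, and_imp]
  constructor
  · intro h s hs
    refine (pvCat_eq_zero_iff s).mpr ⟨fun h2 => hw ⟨s, hs, (pvCat_eq_two_iff s).mpr h2⟩, ?_⟩
    have := h (PySem.Str.lower s) s hs rfl
    tauto
  · rintro h y s hs rfl
    have := ((pvCat_eq_zero_iff s).mp (h s hs)).2
    tauto

-- ===== VERDICT (by name: the statement is the Claim_ definition above) =====
theorem parse_guarded_tokens_py_spec : Claim_equal_parse_guarded_tokens_py := by
  intro tokens _
  unfold Spec_parse_guarded_tokens_py parse_guarded_tokens_py parse_guarded_tokens_py_alt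
  set N := tokens.foldl pvStepA PySem.Set.empty
  by_cases hN : N = []
  · simp [hN, PySem.List.max?]
  · have hmapne : N.map (fun s => PySem.Dict.getD pvCategory (PySem.Str.lower s) 1) ≠ [] := by
      simpa using hN
    obtain ⟨m, hm⟩ : ∃ m, PySem.List.max?
        (N.map (fun s => PySem.Dict.getD pvCategory (PySem.Str.lower s) 1)) (fun x => x) = some m := by
      rcases h : PySem.List.max? (N.map (fun s => PySem.Dict.getD pvCategory (PySem.Str.lower s) 1)) (fun x => x) with _ | m
      · exact absurd ((PySem.List.max?_eq_none_iff _ _).mp h) hmapne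
      · exact ⟨m, rfl⟩
    obtain ⟨s0, hs0, hs0c⟩ := List.mem_map.mp (PySem.List.max?_mem hm)
    have hc0 : pvCat s0 = m := hs0c
    by_cases h2 : ∃ s ∈ N, pvCat s = 2
    · -- max is 2: A takes the wildcard branch, B the verdict = 2 branch
      obtain ⟨s, hs, hc⟩ := h2
      have hle : pvCat s ≤ m :=
        PySem.List.max?_isMax hm (pvCat s) (List.mem_map.mpr ⟨s, hs, rfl⟩)
      have hm2 : m = 2 := by rcases pvCat_range s0 with h | h | h <;> omega
      simp only [hN, hm, hm2]
      simp
      intro ha hb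
      rcases (pvCat_eq_two_iff s).mp hc with h | h
      · exact absurd h (ha s hs)
      · exact absurd h (hb s hs)
    · by_cases h0 : ∀ s ∈ N, pvCat s = 0
      · have hm0 : m = 0 := by have := h0 s0 hs0; omega
        have hsub := (sub_iff N h2).mpr h0
        simp [hN, hm, hsub, hm0]
        refine ⟨fun x hx hxx => ?_, fun x hx hxx => ?_⟩ <;>
          exact ((pvCat_eq_zero_iff x).mp (h0 x hx)).1 (by simp [hxx])
      · have hsub : ¬ (PySem.Set.issubset (PySem.Set.ofList (N.map PySem.Str.lower))
            (PySem.Set.ofList ["none", "off", "false", "0"]) = true) :=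
          fun hcon => h0 ((sub_iff N h2).mp hcon)
        obtain ⟨s, hs, hcne⟩ : ∃ s ∈ N, pvCat s ≠ 0 := by
          by_contra hcon
          exact h0 fun s hs => by by_contra hne; exact hcon ⟨s, hs, hne⟩
        have hc1 : pvCat s = 1 := by
          rcases pvCat_range s with h | h | h
          · exact absurd h hcne
          · exact h
          · exact absurd ⟨s, hs, h⟩ h2
        have hge : pvCat s ≤ m :=
          PySem.List.max?_isMax hm (pvCat s) (List.mem_map.mpr ⟨s, hs, rfl⟩)
        have hne2 : pvCat s0 ≠ 2 := fun h => h2 ⟨s0, hs0, h⟩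
        have hm1 : m = 1 := by rcases pvCat_range s0 with h | h | h <;> omega
        simp [hN, hm, hsub, hm1]
        refine ⟨fun x hx hxx => ?_, fun x hx hxx => ?_⟩ <;>
          exact h2 ⟨x, hx, (pvCat_eq_two_iff x).mpr (by simp [hxx])⟩
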